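-- pv_equiv track=rewrite | github.com/Alexander-Ageev/Exercises | 28 exercises/1 (Squirrel)/1.py | squirrel
-- ===== SOURCE A (Python) =====
-- def squirrel(N):
--     nuts = 0
--     for i in range(N+1):
--         if i == 0:
--             nuts = 1
--         else:
--             nuts *= i
--     emeralds_s = str(nuts)[0]
--     emeralds = int(emeralds_s)
--     return emeralds
-- ===== SOURCE B (Python) =====
-- def squirrel(N):
--     if N < 0:
--         return 0
--     q = _prod(2, N)
--     # first decimal digit without a full decimal conversion: strip digits away
--     # with progressively smaller power-of-ten strides (each keeps the first digit)
--     q = _strip(q, 10 ** 10000)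
--     q = _strip(q, 10 ** 100)
--     q = _strip(q, 10)
--     return q
--
-- def _strip(q, p):
--     while q >= p:
--         q //= p
--     return q
--
-- def _prod(lo, hi):
--     # product of the integers lo..hi by balanced binary splitting
--     if lo > hi:
--         return 1
--     if lo == hi:
--         return lo
--     mid = (lo + hi) // 2
--     return _prod(lo, mid) * _prod(mid + 1, hi)
-- ===== Notes on version B (the rewrite author's own statement) =====
-- stated objective: faster
-- what changed: Replaces the left-to-right running product over range(N+1) by a divide-and-conquer binary-splitting product of 2..N (balanced subproducts keep operands small), with the same first-digit extraction.
import Mathlib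
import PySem

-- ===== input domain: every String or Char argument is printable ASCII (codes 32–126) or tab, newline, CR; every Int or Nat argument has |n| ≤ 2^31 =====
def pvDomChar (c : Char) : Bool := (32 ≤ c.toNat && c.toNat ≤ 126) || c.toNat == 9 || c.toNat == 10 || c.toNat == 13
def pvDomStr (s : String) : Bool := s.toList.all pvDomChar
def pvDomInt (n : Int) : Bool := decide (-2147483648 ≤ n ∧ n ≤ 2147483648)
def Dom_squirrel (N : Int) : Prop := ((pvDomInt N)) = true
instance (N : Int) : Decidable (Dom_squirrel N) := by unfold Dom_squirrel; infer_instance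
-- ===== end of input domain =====

-- B replaces A's running product over range(N+1) by a balanced divide-and-conquer
-- product of 2..N and extracts the first decimal digit by division instead of str().

-- ===== PORT A =====
def squirrel (N : Int) : Int :=
  let nuts := (PySem.List.pyRange 0 (N + 1) 1).foldl
      (fun nuts i => if i == 0 then (1 : Int) else nuts * i) 0
  -- str(nuts)[0]: str of an int is never empty, so the index never raises and the
  -- getD default is unreachable; int(<one decimal digit>) never raises either.
  let emeralds_s := (PySem.List.pyGet? (PySem.Int.toChars nuts) 0).getD '0'
  (PySem.Int.ofChars? [emeralds_s]).getD 0

-- ===== PORT B =====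
-- _prod(lo, hi): product of the integers lo..hi by balanced binary splitting.
-- Modelled with a structural fuel counter (always sufficient: the recursion depth
-- is at most the range length); this is a totality guard, not an algorithm change.
def pyProdGo (fuel : Nat) (lo hi : Int) : Int :=
  match fuel with
  | 0 => 1
  | fuel + 1 =>
    if lo > hi then 1
    else if lo = hi then lo
    else
      let mid := PySem.Int.floordiv (lo + hi) 2
      pyProdGo fuel lo mid * pyProdGo fuel (mid + 1) hi

def pyProd (lo hi : Int) : Int := pyProdGo ((hi - lo).toNat + 1) lo hi

-- _strip(q, p): the 'while q >= p: q //= p' loop, with the same fuel guard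
def pyStripGo (fuel : Nat) (q p : Int) : Int :=
  match fuel with
  | 0 => q
  | fuel + 1 => if p ≤ q then pyStripGo fuel (PySem.Int.floordiv q p) p else q

def pyStrip (q p : Int) : Int := pyStripGo q.toNat q p

def squirrel_alt (N : Int) : Int :=
  if N < 0 then 0
  else
    let fact := pyProd 2 N
    let q1 := pyStrip fact (10 ^ (10000 : Nat))
    let q2 := pyStrip q1 (10 ^ (100 : Nat))
    pyStrip q2 10

-- ===== PRECONDITION & SPEC =====
def Spec_squirrel (N : Int) (out : Int) : Prop := out = squirrel_alt N
instance (N : Int) (out : Int) : Decidable (Spec_squirrel N out) := by unfold Spec_squirrel; infer_instance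

-- ===== CLAIM (what is proved, stated in full; the proofs are below) =====
def Claim_equal_squirrel : Prop := ∀ (N : Int), Dom_squirrel N → Spec_squirrel N (squirrel N)

-- ===== LEMMAS AND PROOFS =====

-- the plain left fold product of the integers lo..hi, the common spine of both ports
def rangeProd (lo hi : Int) : Int :=
  (PySem.List.pyRange lo (hi + 1) 1).foldl (fun acc x => acc * x) 1

-- leading decimal digit of a natural number
def leadN (m : Nat) : Nat := if m < 10 then m else leadN (m / 10)
termination_by m
decreasing_by omega

-- big-endian decimal digit characters of m (the value Nat.toDigits 10 computes)
def digChars (m : Nat) : List Char :=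
  if m < 10 then [Nat.digitChar m] else digChars (m / 10) ++ [Nat.digitChar (m % 10)]
termination_by m
decreasing_by omega

lemma foldl_mul_shift (l : List Int) (a : Int) :
    l.foldl (fun acc x => acc * x) a = a * l.foldl (fun acc x => acc * x) 1 := by
  induction l generalizing a with
  | nil => simp
  | cons x l ih =>
    simp only [List.foldl_cons]
    rw [ih (a * x), ih (1 * x)]
    ring

lemma foldl_mul_pos (l : List Int) (hl : ∀ x ∈ l, 1 ≤ x) (a : Int) (ha : 1 ≤ a) :
    1 ≤ l.foldl (fun acc x => acc * x) a := by
  induction l generalizing a with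
  | nil => simpa
  | cons x l ih =>
    simp only [List.foldl_cons]
    exact ih (fun y hy => hl y (List.mem_cons_of_mem _ hy)) _
      (by nlinarith [hl x (by simp)])

lemma pyProdGo_eq (fuel : Nat) (lo hi : Int) (h : (hi - lo).toNat < fuel) :
    pyProdGo fuel lo hi = rangeProd lo hi := by
  induction fuel generalizing lo hi with
  | zero => omega
  | succ fuel ih =>
    rw [pyProdGo]
    by_cases h1 : lo > hi
    · rw [if_pos h1]
      unfold rangeProd
      rw [PySem.List.pyRange_one_eq_nil (by omega)]
      rfl
    · rw [if_neg h1]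
      by_cases h2 : lo = hi
      · rw [if_pos h2, h2]
        unfold rangeProd
        rw [PySem.List.pyRange_one_singleton]
        simp
      · rw [if_neg h2]
        simp only
        have hm1 : lo ≤ PySem.Int.floordiv (lo + hi) 2 :=
          (PySem.Int.floordiv_two_mid_bounds (by omega)).1
        have hm2 : PySem.Int.floordiv (lo + hi) 2 < hi := by
          rw [PySem.Int.floordiv_lt_iff_lt_mul (by omega)]; omega
        rw [ih _ _ (by omega), ih _ _ (by omega)]
        unfold rangeProd
        rw [PySem.List.pyRange_one_append lo (PySem.Int.floordiv (lo + hi) 2 + 1) (hi + 1)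
          (by omega) (by omega), List.foldl_append, foldl_mul_shift]
        conv_rhs => rw [foldl_mul_shift]

lemma pyProd_eq (lo hi : Int) : pyProd lo hi = rangeProd lo hi :=
  pyProdGo_eq _ lo hi (by omega)

lemma rangeProd_pos (lo hi : Int) (h : 1 ≤ lo) : 1 ≤ rangeProd lo hi := by
  apply foldl_mul_pos _ _ _ le_rfl
  intro x hx
  have := (PySem.List.mem_pyRange_one.mp hx).1
  omega

lemma A_loop (N : Int) (h : 0 ≤ N) :
    (PySem.List.pyRange 0 (N + 1) 1).foldl
      (fun nuts i => if i == 0 then (1 : Int) else nuts * i) 0 = rangeProd 1 N := by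
  rw [PySem.List.pyRange_one_cons (by omega)]
  simp only [List.foldl_cons]
  norm_num
  rw [PySem.List.foldl_congr_mem _ _ (fun acc x => acc * x) _ ?_]
  · unfold rangeProd
    norm_num
  · intro acc x hx
    have := (PySem.List.mem_pyRange_one.mp hx).1
    simp only
    rw [if_neg (by omega)]

lemma rangeProd_one_two (N : Int) (h : 0 ≤ N) : rangeProd 1 N = rangeProd 2 N := by
  rcases eq_or_lt_of_le h with h0 | h1
  · subst h0; decide
  · unfold rangeProd
    rw [PySem.List.pyRange_one_cons (show (1:Int) < N + 1 by omega)]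
    simp

-- characterisation of Nat.toDigitsCore (with enough fuel) as digChars
lemma toDigitsCore_eq (fuel m : Nat) (acc : List Char) (h : m < fuel) :
    Nat.toDigitsCore 10 fuel m acc = digChars m ++ acc := by
  induction fuel generalizing m acc with
  | zero => omega
  | succ fuel ih =>
    rw [Nat.toDigitsCore.eq_def]
    simp only
    by_cases h10 : m / 10 = 0
    · rw [if_pos h10, digChars, if_pos (by omega), Nat.mod_eq_of_lt (by omega)]
      rfl
    · have hlt : m / 10 < fuel := by omega
      rw [if_neg h10, ih _ _ hlt]
      conv_rhs => rw [digChars, if_neg (by omega)]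
      simp

lemma leadN_lt (m : Nat) : leadN m < 10 := by
  fun_induction leadN m with
  | case1 m h => omega
  | case2 m h ih => exact ih

lemma digChars_head (m : Nat) : (digChars m).head? = some (Nat.digitChar (leadN m)) := by
  fun_induction digChars m with
  | case1 m h =>
    conv_rhs => rw [leadN, if_pos h]
    rfl
  | case2 m h ih =>
    rw [List.head?_append, ih]
    conv_rhs => rw [leadN, if_neg h]
    rfl

lemma toChars_head (n : Int) (h : 0 ≤ n) :
    PySem.List.pyGet? (PySem.Int.toChars n) 0 = some (Nat.digitChar (leadN n.toNat)) := by
  rw [PySem.List.pyGet?_zero, ← List.head?_eq_getElem?]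
  rw [PySem.Int.toChars, if_neg (by omega)]
  rw [Nat.toDigits, toDigitsCore_eq _ _ _ (by omega), List.append_nil]
  exact digChars_head n.toNat

lemma ofChars_digit (d : Nat) (h : d < 10) :
    PySem.Int.ofChars? [Nat.digitChar d] = some (d : Int) := by
  interval_cases d <;> decide

lemma extractA (n : Int) (h : 0 ≤ n) :
    (PySem.Int.ofChars? [(PySem.List.pyGet? (PySem.Int.toChars n) 0).getD '0']).getD 0
      = (leadN n.toNat : Int) := by
  rw [toChars_head n h]
  simp only [Option.getD_some]
  rw [ofChars_digit _ (leadN_lt _)]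
  rfl

-- divide m by P while it is ≥ P (Nat side; the P ≤ 1 guard only serves totality)
def stripN (m P : Nat) : Nat :=
  if P ≤ 1 then m
  else if m < P then m
  else stripN (m / P) P
termination_by m
decreasing_by exact Nat.div_lt_self (by omega) (by omega)

lemma stripGo_eq (fuel m P : Nat) (hP : 10 ≤ P) (h : m < fuel + P) :
    pyStripGo fuel (m : Int) (P : Int) = (stripN m P : Int) := by
  induction fuel generalizing m with
  | zero =>
    rw [pyStripGo, stripN, if_neg (by omega), if_pos (by omega)]
  | succ fuel ih =>
    rw [pyStripGo]
    by_cases hm : m < P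
    · rw [if_neg (by exact_mod_cast by omega), stripN, if_neg (by omega), if_pos hm]
    · rw [if_pos (by exact_mod_cast by omega), PySem.Int.floordiv_natCast]
      have hd : m / P ≤ m / 10 := Nat.div_le_div_left hP (by norm_num)
      rw [ih _ (by omega)]
      conv_rhs => rw [stripN, if_neg (by omega), if_neg hm]

lemma strip_natCast (m P : Nat) (hP : 10 ≤ P) :
    pyStrip (m : Int) (P : Int) = (stripN m P : Int) := by
  rw [pyStrip, Int.toNat_natCast]
  exact stripGo_eq m m P hP (by omega)

lemma leadN_div_pow (m k : Nat) (h : 10 ^ k ≤ m) : leadN (m / 10 ^ k) = leadN m := by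
  induction k with
  | zero => simp
  | succ k ih =>
    have hk : 10 ^ k ≤ m := le_trans (Nat.pow_le_pow_right (by omega) (by omega)) h
    have h10 : 10 ≤ m / 10 ^ k := by
      rw [Nat.le_div_iff_mul_le (Nat.pow_pos (by norm_num))]
      calc 10 * 10 ^ k = 10 ^ (k + 1) := by ring
        _ ≤ m := h
    have hd : m / 10 ^ (k + 1) = m / 10 ^ k / 10 := by
      rw [Nat.div_div_eq_div_mul, pow_succ]
    rw [hd, ← ih hk]
    conv_rhs => rw [leadN, if_neg (by omega)]

lemma leadN_stripN (m c : Nat) : leadN (stripN m (10 ^ c)) = leadN m := by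
  fun_induction stripN m (10 ^ c) with
  | case1 m h => rfl
  | case2 m h h' => rfl
  | case3 m h h' ih =>
    rw [ih]
    exact leadN_div_pow m c (by omega)

lemma stripN_ten (m : Nat) : stripN m 10 = leadN m := by
  fun_induction stripN m 10 with
  | case1 m h => omega
  | case2 m h h' => rw [leadN, if_pos (by omega)]
  | case3 m h h' ih => rw [ih]; conv_rhs => rw [leadN, if_neg (by omega)]

lemma ten_le_pow (c : Nat) (hc : 1 ≤ c) : 10 ≤ 10 ^ c := by
  calc (10 : Nat) = 10 ^ 1 := (pow_one 10).symm
    _ ≤ 10 ^ c := Nat.pow_le_pow_right (by omega) hc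

lemma extractB (n : Int) (h : 1 ≤ n) :
    pyStrip (pyStrip (pyStrip n (10 ^ (10000 : Nat))) (10 ^ (100 : Nat))) 10
      = (leadN n.toNat : Int) := by
  have hn : n = ((n.toNat : Nat) : Int) := by omega
  have hpow : ∀ c : Nat, (10 : Int) ^ c = ((10 ^ c : Nat) : Int) := fun c => by
    push_cast; ring
  have hp3 : (10 : Int) = ((10 : Nat) : Int) := by norm_num
  rw [hn]
  rw [hpow 10000]
  rw [strip_natCast _ _ (ten_le_pow 10000 (by omega))]
  rw [hpow 100]
  rw [strip_natCast _ _ (ten_le_pow 100 (by omega))]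
  rw [hp3]
  rw [strip_natCast _ _ (le_refl 10)]
  rw [stripN_ten]
  rw [leadN_stripN _ 100]
  rw [leadN_stripN _ 10000]
  rw [Int.toNat_natCast]

-- ===== VERDICT (by name: the statement is the Claim_ definition above) =====
theorem squirrel_spec : Claim_equal_squirrel := by
  intro N _
  unfold Spec_squirrel
  by_cases hN : N < 0
  · have hB : squirrel_alt N = 0 := by rw [squirrel_alt, if_pos hN]
    rw [hB]
    show squirrel N = 0
    unfold squirrel
    rw [PySem.List.pyRange_one_eq_nil (by omega)]
    decide
  · have hN' : 0 ≤ N := by omega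
    have hpos : 1 ≤ rangeProd 2 N := rangeProd_pos 2 N (by omega)
    show squirrel N = squirrel_alt N
    unfold squirrel squirrel_alt
    rw [if_neg hN]
    simp only
    rw [A_loop N hN', rangeProd_one_two N hN', pyProd_eq]
    rw [extractA _ (by omega), extractB _ hpos]
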